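-- pv_equiv track=rewrite | github.com/s-koide-dc/Design2Code | src/design_parser/design_inference.py | _insert_inference_block
-- ===== SOURCE A (Python) =====
-- def _insert_inference_block(content: str, block: str) -> str:
--     lines = content.splitlines()
--     out = []
--     inserted = False
--     in_purpose = False
--     for i, line in enumerate(lines):
--         lower = line.strip().lower()
--         if lower.startswith("## purpose"):
--             in_purpose = True
--             out.append(line)
--             continue
--         if in_purpose and (line.strip().startswith("## ") or line.strip().startswith("### ")):
--             out.append(block.strip())
--             inserted = True
--             in_purpose = False
--         out.append(line)
--     if not inserted:
--         out.append(block.strip())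
--     return "\n".join(out) + ("\n" if content.endswith("\n") else "")
-- ===== SOURCE B (Python) =====
-- def _insert_inference_block(content: str, block: str) -> str:
--     lines = content.splitlines()
--
--     def kind(line):
--         s = line.strip()
--         if s.lower().startswith("## purpose"):
--             return 1
--         if s.startswith("## ") or s.startswith("### "):
--             return 2
--         return 0
--
--     kinds = [kind(line) for line in lines]
--     marks = []
--     last = 0
--     for k in kinds:
--         marks.append(last)
--         last = k or last
--     b = block.strip()
--     out = [piece
--            for line, k, m in zip(lines, kinds, marks)
--            for piece in ([b, line] if k == 2 and m == 1 else [line])]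
--     if not any(k == 2 and m == 1 for k, m in zip(kinds, marks)):
--         out.append(b)
--     return "\n".join(out) + ("\n" if content.endswith("\n") else "")
-- ===== Notes on version B (the rewrite author's own statement) =====
-- stated objective: alternative
-- what changed: Replaces A's single stateful loop with boolean flags by a three-phase pipeline: classify every line into a kind (purpose/heading/plain), prefix-scan the last marker seen before each line, then build the output as one comprehension over the zipped (line, kind, mark) triples with any() deciding the fallback append.
import Mathlib
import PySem

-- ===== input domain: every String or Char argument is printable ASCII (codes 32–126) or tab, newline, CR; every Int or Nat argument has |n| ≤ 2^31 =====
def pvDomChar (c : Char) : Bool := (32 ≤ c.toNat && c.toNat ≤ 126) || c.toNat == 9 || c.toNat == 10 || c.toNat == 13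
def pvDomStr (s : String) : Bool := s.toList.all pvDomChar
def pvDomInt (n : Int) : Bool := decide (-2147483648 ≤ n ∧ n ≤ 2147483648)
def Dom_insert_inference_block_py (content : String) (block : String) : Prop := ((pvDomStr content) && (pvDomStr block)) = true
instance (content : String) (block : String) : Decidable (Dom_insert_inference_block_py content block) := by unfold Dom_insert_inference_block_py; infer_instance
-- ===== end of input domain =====

-- B replaces A's single stateful flag loop by three phases (classify each line, prefix-scan of the
-- last marker, comprehension over the zipped triples); objective: alternative decomposition, same cost.


-- ===== PORT A =====
-- loop body of A, named so the proofs can reason about the fold step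
def pvStepA (block : String) (st : List String × Bool × Bool) (line : String) : List String × Bool × Bool :=
  if PySem.Str.startswith (PySem.Str.lower (PySem.Str.strip line)) "## purpose" then
    (st.1 ++ [line], st.2.1, true)
  else if st.2.2 && (PySem.Str.startswith (PySem.Str.strip line) "## " ||
                      PySem.Str.startswith (PySem.Str.strip line) "### ") then
    (st.1 ++ [PySem.Str.strip block, line], true, false)
  else
    (st.1 ++ [line], st.2.1, st.2.2)

def insert_inference_block_py (content : String) (block : String) : String :=
  let lines := PySem.Str.splitlines content
  let res := lines.foldl (pvStepA block) ([], false, false)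
  let out := if !res.2.1 then res.1 ++ [PySem.Str.strip block] else res.1
  PySem.Str.join "
" out ++ (if PySem.Str.endswith content "
" then "
" else "")

-- ===== PORT B =====
def pvKind (line : String) : Int :=
  if PySem.Str.startswith (PySem.Str.lower (PySem.Str.strip line)) "## purpose" then 1
  else if PySem.Str.startswith (PySem.Str.strip line) "## " ||
          PySem.Str.startswith (PySem.Str.strip line) "### " then 2
  else 0

-- body of B's comprehension over one (line, kind, mark) triple, and its insertion test
def pvPick (b : String) (t : String × Int × Int) : List String :=
  if t.2.1 == 2 && t.2.2 == 1 then [b, t.1] else [t.1]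

def pvHit (t : Int × Int) : Bool := t.1 == 2 && t.2 == 1

def insert_inference_block_py_alt (content : String) (block : String) : String :=
  let lines := PySem.Str.splitlines content
  let kinds := lines.map pvKind
  let ml := kinds.foldl (fun (st : List Int × Int) k =>
    (st.1 ++ [st.2], if k ≠ 0 then k else st.2)) ([], 0)
  let marks := ml.1
  let b := PySem.Str.strip block
  let out := (lines.zip (kinds.zip marks)).flatMap (pvPick b)
  let out := if !((kinds.zip marks).any pvHit) then out ++ [b] else out
  PySem.Str.join "\n" out ++ (if PySem.Str.endswith content "\n" then "\n" else "")

-- ===== PRECONDITION & SPEC =====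
def Spec_insert_inference_block_py (content : String) (block : String) (out : String) : Prop := out = insert_inference_block_py_alt content block
instance (content : String) (block : String) (out : String) : Decidable (Spec_insert_inference_block_py content block out) := by unfold Spec_insert_inference_block_py; infer_instance

-- ===== CLAIM (what is proved, stated in full; the proofs are below) =====
def Claim_equal_insert_inference_block_py : Prop := ∀ (content : String) (block : String), Dom_insert_inference_block_py content block → Spec_insert_inference_block_py content block (insert_inference_block_py content block)

-- ===== LEMMAS AND PROOFS =====

-- proof-side recursive views of B's three phases
def pvNext (k last : Int) : Int := if k ≠ 0 then k else last

def pvMarksRec : List Int → Int → List Int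
  | [], _ => []
  | k :: ks, last => last :: pvMarksRec ks (pvNext k last)

def pvBody (b : String) : List String → Int → List String
  | [], _ => []
  | l :: ls, last => pvPick b (l, pvKind l, last) ++ pvBody b ls (pvNext (pvKind l) last)

def pvIns : List String → Int → Bool
  | [], _ => false
  | l :: ls, last => pvHit (pvKind l, last) || pvIns ls (pvNext (pvKind l) last)

def pvFinLast : List String → Int → Int
  | [], last => last
  | l :: ls, last => pvFinLast ls (pvNext (pvKind l) last)

theorem pv_marks_fold (ks : List Int) (acc : List Int) (last : Int) :
    (ks.foldl (fun (st : List Int × Int) k =>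
      (st.1 ++ [st.2], if k ≠ 0 then k else st.2)) (acc, last)).1 = acc ++ pvMarksRec ks last := by
  induction ks generalizing acc last with
  | nil => simp [pvMarksRec]
  | cons k ks ih =>
    rw [List.foldl_cons, ih]
    simp [pvMarksRec, pvNext]

theorem pv_body_zip (b : String) (lines : List String) (last : Int) :
    (lines.zip ((lines.map pvKind).zip (pvMarksRec (lines.map pvKind) last))).flatMap (pvPick b)
      = pvBody b lines last := by
  induction lines generalizing last with
  | nil => rfl
  | cons l ls ih =>
    simp only [List.map_cons, pvMarksRec, List.zip_cons_cons, List.flatMap_cons, pvBody]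
    rw [ih]

theorem pv_ins_zip (lines : List String) (last : Int) :
    ((lines.map pvKind).zip (pvMarksRec (lines.map pvKind) last)).any pvHit = pvIns lines last := by
  induction lines generalizing last with
  | nil => rfl
  | cons l ls ih =>
    simp only [List.map_cons, pvMarksRec, List.zip_cons_cons, List.any_cons, pvIns]
    rw [ih]

theorem pv_loopA (block : String) (lines : List String) (out : List String) (inserted : Bool) (last : Int) :
    lines.foldl (pvStepA block) (out, inserted, (last == 1 : Bool)) =
    (out ++ pvBody (PySem.Str.strip block) lines last,
     inserted || pvIns lines last,
     (pvFinLast lines last == 1 : Bool)) := by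
  induction lines generalizing out inserted last with
  | nil => simp [pvBody, pvIns, pvFinLast]
  | cons l ls ih =>
    rw [List.foldl_cons]
    by_cases hp : PySem.Str.startswith (PySem.Str.lower (PySem.Str.strip l)) "## purpose" = true
    · have hk : pvKind l = 1 := by unfold pvKind; rw [if_pos hp]
      have hstep : pvStepA block (out, inserted, (last == 1 : Bool)) l
          = (out ++ [l], inserted, ((1 : Int) == 1 : Bool)) := by
        unfold pvStepA; rw [if_pos hp]; rfl
      rw [hstep, ih (out ++ [l]) inserted 1]
      simp only [pvBody, pvIns, pvFinLast]
      rw [hk]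
      simp [pvPick, pvHit, pvNext]
    · by_cases hh : (PySem.Str.startswith (PySem.Str.strip l) "## " ||
                      PySem.Str.startswith (PySem.Str.strip l) "### ") = true
      · have hk : pvKind l = 2 := by unfold pvKind; rw [if_neg hp, if_pos hh]
        by_cases hl : last = 1
        · subst hl
          have hstep : pvStepA block (out, inserted, ((1 : Int) == 1 : Bool)) l
              = (out ++ [PySem.Str.strip block, l], true, ((2 : Int) == 1 : Bool)) := by
            unfold pvStepA; rw [if_neg hp, if_pos (by rw [hh]; rfl)]; rfl
          rw [hstep, ih (out ++ [PySem.Str.strip block, l]) true 2]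
          simp only [pvBody, pvIns, pvFinLast]
          rw [hk]
          simp [pvPick, pvHit, pvNext]
        · have hlb : ((last == 1 : Bool)) = false := by simp [hl]
          have hstep : pvStepA block (out, inserted, (last == 1 : Bool)) l
              = (out ++ [l], inserted, ((2 : Int) == 1 : Bool)) := by
            unfold pvStepA
            rw [if_neg hp, if_neg (by simp [hlb])]
            rw [hlb]; rfl
          rw [hstep, ih (out ++ [l]) inserted 2]
          simp only [pvBody, pvIns, pvFinLast]
          rw [hk]
          simp [pvPick, pvHit, pvNext, hlb]
      · have hk : pvKind l = 0 := by unfold pvKind; rw [if_neg hp, if_neg hh]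
        have hh' := hh
        simp at hh' 
        have hstep : pvStepA block (out, inserted, (last == 1 : Bool)) l
            = (out ++ [l], inserted, (last == 1 : Bool)) := by
          unfold pvStepA
          rw [if_neg hp, if_neg (by simp [hh'])]
        rw [hstep, ih (out ++ [l]) inserted last]
        simp only [pvBody, pvIns, pvFinLast]
        rw [hk]
        simp [pvPick, pvHit, pvNext]

-- ===== VERDICT (by name: the statement is the Claim_ definition above) =====
theorem insert_inference_block_py_spec : Claim_equal_insert_inference_block_py := by
  intro content block _
  unfold Spec_insert_inference_block_py
  simp only [insert_inference_block_py, insert_inference_block_py_alt]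
  have hA := pv_loopA block (PySem.Str.splitlines content) [] false 0
  rw [show ((0 : Int) == 1 : Bool) = false from by decide] at hA
  rw [hA, pv_marks_fold]
  simp only [List.nil_append]
  rw [pv_body_zip, pv_ins_zip]
  simp
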